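-- pv_equiv track=rewrite | github.com/laboratoriodigitale33-sketch/Eserciziario | generate_exercises.py | normalize_single_quoted_strings
-- ===== SOURCE A (Python) =====
-- def normalize_single_quoted_strings(js_text: str) -> str:
--     out: list[str] = []
--     i = 0
--     n = len(js_text)
--     in_string = False
--     delim = ""
--     escape = False
--
--     while i < n:
--         ch = js_text[i]
--         if not in_string:
--             if ch == "'":
--                 in_string = True
--                 delim = "'"
--                 out.append('"')
--             elif ch == '"':
--                 in_string = True
--                 delim = '"'
--                 out.append(ch)
--             else:
--                 out.append(ch)
--             i += 1
--             continue
--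
--         if escape:
--             if delim == "'" and ch == '"':
--                 out.append('\\"')
--             else:
--                 out.append(ch)
--             escape = False
--             i += 1
--             continue
--
--         if ch == "\\":
--             escape = True
--             out.append(ch)
--             i += 1
--             continue
--
--         if ch == delim:
--             out.append('"' if delim == "'" else ch)
--             in_string = False
--             i += 1
--             continue
--
--         if delim == "'" and ch == '"':
--             out.append('\\"')
--         else:
--             out.append(ch)
--         i += 1
--
--     return "".join(out)
-- ===== SOURCE B (Python) =====
-- def _lex(js_text):
--     # pass 1: split the text into tokens: (None, code) runs without quotes,
--     # (delim, body, closed) string tokens (body excludes the delimiters)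
--     tokens = []
--     i, n = 0, len(js_text)
--     while i < n:
--         ch = js_text[i]
--         if ch != "'" and ch != '"':
--             j = i
--             while j < n and js_text[j] != "'" and js_text[j] != '"':
--                 j += 1
--             tokens.append((None, js_text[i:j], False))
--             i = j
--         else:
--             j = i + 1
--             closed = False
--             while j < n:
--                 c = js_text[j]
--                 j += 1
--                 if c == '\\':
--                     j += 1
--                 elif c == ch:
--                     closed = True
--                     break
--             body_end = (j - 1) if closed else min(j, n)
--             tokens.append((ch, js_text[i + 1:body_end], closed))
--             i = j
--     return tokens
--
--
-- def _render(tok):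
--     delim, body, closed = tok
--     if delim is None or delim == '"':
--         close = delim if (delim is not None and closed) else ''
--         open_ = delim if delim is not None else ''
--         return open_ + body + close
--     # single-quoted: every double quote in the body gets escaped
--     return '"' + ''.join('\\"' if c == '"' else c for c in body) + ('"' if closed else '')
--
--
-- def normalize_single_quoted_strings(js_text: str) -> str:
--     return "".join(_render(t) for t in _lex(js_text))
-- ===== Notes on version B (the rewrite author's own statement) =====
-- stated objective: alternative
-- what changed: Replaced A's single-pass character state machine (in_string/delim/escape flags emitting as it scans) by two staged passes: a lexer that only splits the text into code runs and string tokens (body, delimiter, closed flag), then a per-token renderer that copies code and double-quoted tokens verbatim and rewrites single-quoted tokens declaratively by escaping every interior double quote.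
import Mathlib
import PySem

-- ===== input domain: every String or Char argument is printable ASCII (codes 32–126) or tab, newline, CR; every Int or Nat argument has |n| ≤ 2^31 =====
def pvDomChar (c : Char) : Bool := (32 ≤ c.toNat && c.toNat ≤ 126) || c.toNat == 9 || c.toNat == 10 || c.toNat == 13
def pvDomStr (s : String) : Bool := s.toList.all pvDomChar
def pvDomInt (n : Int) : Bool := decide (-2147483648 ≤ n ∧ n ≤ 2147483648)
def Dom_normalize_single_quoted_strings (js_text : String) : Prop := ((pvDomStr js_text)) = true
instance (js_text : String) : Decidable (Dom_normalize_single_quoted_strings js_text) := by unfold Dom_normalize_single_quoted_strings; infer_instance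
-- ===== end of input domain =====

-- B replaces A's single-pass character state machine by two staged passes: a lexer that only
-- SPLITS the text into code runs and string tokens, then a per-token renderer that rewrites each
-- single-quoted token declaratively (escape every interior double quote); same output.

-- ===== PORT A =====
-- A's while loop, one character per step; state: in_string, delim (a string, "" initially),
-- escape, and the accumulated output (Python's out list of strings, kept as the flat char list).
def nsqA (l : List Char) (in_string : Bool) (delim : String) (escape : Bool) (acc : List Char) : List Char :=
  match l with
  | [] => acc
  | ch :: rest =>
    if !in_string then
      if ch = '\'' then nsqA rest true "'" escape (acc ++ ['"'])
      else if ch = '"' then nsqA rest true "\"" escape (acc ++ [ch])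
      else nsqA rest in_string delim escape (acc ++ [ch])
    else if escape then
      if delim = "'" ∧ ch = '"' then nsqA rest in_string delim false (acc ++ ['\\', '"'])
      else nsqA rest in_string delim false (acc ++ [ch])
    else if ch = '\\' then nsqA rest in_string delim true (acc ++ [ch])
    else if String.singleton ch = delim then
      nsqA rest false delim escape (acc ++ (if delim = "'" then ['"'] else [ch]))
    else if delim = "'" ∧ ch = '"' then nsqA rest in_string delim escape (acc ++ ['\\', '"'])
    else nsqA rest in_string delim escape (acc ++ [ch])

def normalize_single_quoted_strings (js_text : String) : String :=
  String.ofList (nsqA js_text.toList false "" false [])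

-- ===== PORT B =====
-- Source B's inner j-loop over a code run: the maximal quote-free prefix and the remainder
def lexCode (l : List Char) : List Char × List Char :=
  match l with
  | [] => ([], [])
  | c :: rest =>
    if c = '\'' ∨ c = '"' then ([], c :: rest)
    else
      let p := lexCode rest
      (c :: p.1, p.2)

-- Source B's inner j-loop over a string body: (body, closed, remainder); a backslash skips the next char
def lexBody (d : Char) (l : List Char) : List Char × Bool × List Char :=
  match l with
  | [] => ([], false, [])
  | c :: rest =>
    if c = '\\' then
      match rest with
      | [] => ([c], false, [])
      | x :: rest' =>
        let p := lexBody d rest'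
        (c :: x :: p.1, p.2.1, p.2.2)
    else if c = d then ([], true, rest)
    else
      let p := lexBody d rest
      (c :: p.1, p.2.1, p.2.2)

-- the two remainder bounds the lexer loop (lexToks) needs for termination
theorem lexCode_len (l : List Char) : (lexCode l).2.length ≤ l.length := by
  induction l with
  | nil => simp [lexCode]
  | cons c rest ih =>
    simp only [lexCode]
    split
    · simp
    · simpa using Nat.le_succ_of_le ih

theorem lexBody_len (d : Char) (n : Nat) : ∀ (l : List Char), l.length ≤ n → (lexBody d l).2.2.length ≤ l.length := by
  induction n with
  | zero =>
    intro l hl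
    have : l = [] := List.eq_nil_of_length_eq_zero (Nat.le_zero.mp hl)
    subst this; simp [lexBody]
  | succ n ih =>
    intro l hl
    match l with
    | [] => simp [lexBody]
    | c :: rest =>
      have hr : rest.length ≤ n := by simp only [List.length_cons] at hl; omega
      by_cases hb : c = '\\'
      · subst hb
        match rest with
        | [] => rw [lexBody.eq_def]; simp
        | x :: rest' =>
          have hr' : rest'.length ≤ n := by simp only [List.length_cons] at hr; omega
          rw [lexBody.eq_def]
          simpa using Nat.le_succ_of_le (Nat.le_succ_of_le (ih rest' hr'))
      · by_cases hc : c = d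
        · subst hc
          rw [lexBody.eq_def]; simp [hb]
        · rw [lexBody.eq_def]
          simp only [if_neg hb, if_neg hc, List.length_cons]
          exact Nat.le_succ_of_le (ih rest hr)

-- Source B's outer while loop (_lex): the list of tokens
def lexToks (l : List Char) : List (Option Char × List Char × Bool) :=
  match l with
  | [] => []
  | c :: rest =>
    if c = '\'' ∨ c = '"' then
      let p := lexBody c rest
      (some c, p.1, p.2.1) :: lexToks p.2.2
    else
      let p := lexCode rest
      (none, c :: p.1, false) :: lexToks p.2
  termination_by l.length
  decreasing_by
  · exact Nat.lt_succ_of_le (lexBody_len c rest.length rest le_rfl)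
  · exact Nat.lt_succ_of_le (lexCode_len rest)

-- the ''.join generator in _render: escape every double quote of a single-quoted body
def escQ (body : List Char) : List Char :=
  body.flatMap (fun c => if c = '"' then ['\\', '"'] else [c])

-- _render: a code run verbatim; a double-quoted token verbatim; a single-quoted token requoted
def renderTok (t : Option Char × List Char × Bool) : List Char :=
  match t with
  | (none, body, _) => body
  | (some d, body, closed) =>
    if d = '"' then d :: body ++ (if closed then [d] else [])
    else '"' :: escQ body ++ (if closed then ['"'] else [])

def normalize_single_quoted_strings_alt (js_text : String) : String :=
  String.ofList (((lexToks js_text.toList).map renderTok).flatten)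

-- ===== PRECONDITION & SPEC =====
def Spec_normalize_single_quoted_strings (js_text : String) (out : String) : Prop := out = normalize_single_quoted_strings_alt js_text
instance (js_text : String) (out : String) : Decidable (Spec_normalize_single_quoted_strings js_text out) := by unfold Spec_normalize_single_quoted_strings; infer_instance

-- ===== CLAIM (what is proved, stated in full; the proofs are below) =====
def Claim_equal_normalize_single_quoted_strings : Prop := ∀ (js_text : String), Dom_normalize_single_quoted_strings js_text → Spec_normalize_single_quoted_strings js_text (normalize_single_quoted_strings js_text)

-- ===== LEMMAS AND PROOFS =====

-- unfolding equations for lexBody on the shapes the invariant proof meets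
theorem lexBody_delim (d : Char) (rest : List Char) (hd : ¬ d = '\\') :
    lexBody d (d :: rest) = ([], true, rest) := by
  rw [lexBody.eq_def]; simp [hd]

theorem lexBody_esc_end (d : Char) : lexBody d ['\\'] = (['\\'], false, []) := by
  rw [lexBody.eq_def]; simp

theorem lexBody_esc (d nxt : Char) (rest' : List Char) :
    lexBody d ('\\' :: nxt :: rest')
      = ('\\' :: nxt :: (lexBody d rest').1, (lexBody d rest').2.1, (lexBody d rest').2.2) := by
  rw [lexBody.eq_def]; simp

theorem lexBody_other (d c : Char) (rest : List Char) (hb : ¬ c = '\\') (hc : ¬ c = d) :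
    lexBody d (c :: rest)
      = (c :: (lexBody d rest).1, (lexBody d rest).2.1, (lexBody d rest).2.2) := by
  rw [lexBody.eq_def]; simp [hb, hc]

-- the flattened rendering of the tokens of l starts with l's leading code run
theorem flat_code (l : List Char) :
    ((lexToks l).map renderTok).flatten
      = (lexCode l).1 ++ ((lexToks (lexCode l).2).map renderTok).flatten := by
  match l with
  | [] => simp [lexCode, lexToks]
  | c :: rest =>
    by_cases h : c = '\'' ∨ c = '"'
    · simp [lexCode, h]
    · rw [lexToks]
      simp [lexCode, h, renderTok]

-- Joint invariant by strong induction on the remaining length: outside a string A's loop produces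
-- the flattened token rendering; inside a string with delimiter d (escape clear) it produces the
-- rendered body of lexBody d, the closing quote if the token closes, and the rest's rendering.
theorem nsq_key (n : Nat) :
    (∀ (l : List Char) (delim : String) (acc : List Char), l.length ≤ n →
        nsqA l false delim false acc = acc ++ ((lexToks l).map renderTok).flatten) ∧
    (∀ (l : List Char) (d : Char) (acc : List Char), l.length ≤ n → (d = '\'' ∨ d = '"') →
        nsqA l true (String.singleton d) false acc =
          acc ++ (if d = '"' then (lexBody d l).1 else escQ (lexBody d l).1)
              ++ (if (lexBody d l).2.1 then ['"'] else [])
              ++ ((lexToks (lexBody d l).2.2).map renderTok).flatten) := by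
  have s1 : String.singleton '\'' = "'" := rfl
  have s2 : String.singleton '"' = "\"" := rfl
  have hne21 : ¬ (("\"" : String) = "'") := by decide
  induction n with
  | zero =>
    constructor
    · intro l delim acc hl
      have : l = [] := List.eq_nil_of_length_eq_zero (Nat.le_zero.mp hl)
      subst this; simp [nsqA, lexToks]
    · intro l d acc hl hd
      have : l = [] := List.eq_nil_of_length_eq_zero (Nat.le_zero.mp hl)
      subst this; simp [nsqA, lexBody, lexToks, escQ]
  | succ n ih =>
    refine ⟨fun l delim acc hl => ?_, fun l d acc hl hd => ?_⟩
    · match l with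
      | [] => simp [nsqA, lexToks]
      | ch :: rest =>
        have hr : rest.length ≤ n := by simp only [List.length_cons] at hl; omega
        by_cases h1 : ch = '\''
        · subst h1
          have h0 := ih.2 rest '\'' (acc ++ ['"']) hr (Or.inl rfl)
          simp only [s1] at h0
          rw [nsqA, lexToks]
          simp only [reduceCtorEq]
          simp [h0, renderTok, escQ]
        · by_cases h2 : ch = '"'
          · subst h2
            have h0 := ih.2 rest '"' (acc ++ ['"']) hr (Or.inr rfl)
            simp only [s2] at h0
            rw [nsqA, lexToks]
            simp [h1, h0, renderTok]
          · rw [nsqA, lexToks]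
            have h0 := ih.1 rest delim (acc ++ [ch]) hr
            simp [h1, h2, h0, flat_code rest, renderTok]
    · match l with
      | [] => simp [nsqA, lexBody, lexToks, escQ]
      | c :: rest =>
        have hr : rest.length ≤ n := by simp only [List.length_cons] at hl; omega
        rcases hd with h | h <;> subst h
        · -- delimiter is a single quote
          by_cases hb : c = '\\'
          · subst hb
            match rest with
            | [] =>
              rw [nsqA]; simp [s1]
              rw [nsqA]; simp [lexBody_esc_end, lexToks, escQ]
            | nxt :: rest' =>
              have hr' : rest'.length ≤ n := by simp only [List.length_cons] at hr; omega
              by_cases hq : nxt = '"'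
              · subst hq
                have h0 := ih.2 rest' '\'' (acc ++ ['\\', '\\', '"']) hr' (Or.inl rfl)
                simp only [s1] at h0
                rw [nsqA]; simp [s1]
                rw [nsqA]; simp [h0, lexBody_esc, escQ]
              · have h0 := ih.2 rest' '\'' (acc ++ ['\\', nxt]) hr' (Or.inl rfl)
                simp only [s1] at h0
                rw [nsqA]; simp [s1]
                rw [nsqA]; simp [hq, h0, lexBody_esc, escQ]
          · by_cases hc : c = '\''
            · subst hc
              have h0 := ih.1 rest "'" (acc ++ ['"']) hr
              rw [nsqA]; simp [s1, h0, lexBody_delim, escQ]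
            · by_cases hq : c = '"'
              · subst hq
                have h0 := ih.2 rest '\'' (acc ++ ['\\', '"']) hr (Or.inl rfl)
                simp only [s1] at h0
                rw [nsqA]
                simp [s1, s2, hne21, h0, lexBody_other, escQ]
              · have h0 := ih.2 rest '\'' (acc ++ [c]) hr (Or.inl rfl)
                simp only [s1] at h0
                have hsng : ¬ (String.singleton c = "'") := by
                  rw [← s1]; intro hx; exact hc (by
                    have := congrArg String.toList hx
                    simpa [String.singleton] using this)
                rw [nsqA]
                simp [s1, hb, hq, hsng, h0, lexBody_other _ _ _ hb hc, escQ]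
        · -- delimiter is a double quote
          by_cases hb : c = '\\'
          · subst hb
            match rest with
            | [] =>
              rw [nsqA]; simp [s2]
              rw [nsqA]; simp [lexBody_esc_end, lexToks]
            | nxt :: rest' =>
              have hr' : rest'.length ≤ n := by simp only [List.length_cons] at hr; omega
              have h0 := ih.2 rest' '"' (acc ++ ['\\', nxt]) hr' (Or.inr rfl)
              simp only [s2] at h0
              rw [nsqA]; simp [s2]
              rw [nsqA]; simp [h0, lexBody_esc]
          · by_cases hq : c = '"'
            · subst hq
              have h0 := ih.1 rest "\"" (acc ++ ['"']) hr
              rw [nsqA]; simp [s2, h0, lexBody_delim]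
            · have h0 := ih.2 rest '"' (acc ++ [c]) hr (Or.inr rfl)
              simp only [s2] at h0
              have hsng : ¬ (String.singleton c = "\"") := by
                rw [← s2]; intro hx; exact hq (by
                  have := congrArg String.toList hx
                  simpa [String.singleton] using this)
              rw [nsqA]
              simp [s2, hb, hsng, h0, lexBody_other _ _ _ hb hq]

-- ===== VERDICT (by name: the statement is the Claim_ definition above) =====
theorem normalize_single_quoted_strings_spec : Claim_equal_normalize_single_quoted_strings := by
  intro js_text _
  unfold Spec_normalize_single_quoted_strings normalize_single_quoted_strings normalize_single_quoted_strings_alt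
  rw [(nsq_key js_text.toList.length).1 js_text.toList "" [] le_rfl]
  rfl
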